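-- pv_equiv track=rewrite | github.com/CamiloGuillen/Normalizing_Houston_Kinetic_Dataset | new_dataset/normalize_dataset.py | get_stride_idx
-- ===== SOURCE A (Python) =====
-- def get_stride_idx(gc_event_label, gc_key):
--     stride_idx = list()
--     if gc_event_label[0] == gc_key:
--         stride_idx.append(0)
--
--     for i in range(1, len(gc_event_label)):
--         if gc_event_label[i] == gc_key and gc_event_label[i - 1] != gc_key:
--             stride_idx.append(i)
--
--     return stride_idx
-- ===== SOURCE B (Python) =====
-- def get_stride_idx(gc_event_label, gc_key):
--     stride_idx = []
--     i = 0
--     n = len(gc_event_label)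
--     while i < n:
--         v = gc_event_label[i]
--         if v == gc_key:
--             stride_idx.append(i)
--         j = i + 1
--         while j < n and gc_event_label[j] == v:
--             j += 1
--         i = j
--     return stride_idx
-- ===== Notes on version B (the rewrite author's own statement) =====
-- stated objective: alternative
-- what changed: A tests every index i for a rising edge via gc_event_label[i]==key and gc_event_label[i-1]!=key; B instead walks the list run by run (consuming each maximal run of equal values in one inner scan) and records the start position of every run whose value equals the key.
-- crash fix: On an empty gc_event_label A raises IndexError (gc_event_label[0]); B returns []. — e.g. on get_stride_idx([], 0): A raises IndexError, B returns []
import Mathlib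
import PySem

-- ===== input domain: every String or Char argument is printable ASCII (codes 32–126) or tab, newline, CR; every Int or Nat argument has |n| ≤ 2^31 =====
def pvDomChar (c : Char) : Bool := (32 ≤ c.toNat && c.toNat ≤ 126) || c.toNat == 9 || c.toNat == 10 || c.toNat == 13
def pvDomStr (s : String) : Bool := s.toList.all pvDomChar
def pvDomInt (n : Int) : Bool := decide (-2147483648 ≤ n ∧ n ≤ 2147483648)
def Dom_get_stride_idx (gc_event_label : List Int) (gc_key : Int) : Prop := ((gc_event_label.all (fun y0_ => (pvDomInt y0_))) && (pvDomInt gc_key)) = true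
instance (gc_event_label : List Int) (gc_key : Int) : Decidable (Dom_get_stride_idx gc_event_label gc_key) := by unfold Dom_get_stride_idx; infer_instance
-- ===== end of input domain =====

-- B walks the list run by run (recording each run start whose value equals the key) instead of
-- A's per-index rising-edge test; same O(n) cost, different decomposition ("alternative").


-- ===== PORT A =====
-- literal port of A: initial test of element 0 (Pre_ guarantees it exists), then a loop over
-- range(1, len) appending i when l[i] == key and l[i-1] != key
def get_stride_idx (gc_event_label : List Int) (gc_key : Int) : List Int :=
  let stride_idx : List Int :=
    if PySem.List.pyGetD gc_event_label 0 0 = gc_key then [0] else []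
  (PySem.List.pyRange 1 (gc_event_label.length : Int) 1).foldl
    (fun acc i =>
      if PySem.List.pyGetD gc_event_label i 0 = gc_key ∧
         ¬ PySem.List.pyGetD gc_event_label (i - 1) 0 = gc_key
      then acc ++ [i] else acc) stride_idx

-- ===== PORT B =====
-- port of B's outer while loop: each step consumes one maximal run (the inner 'while j < n and
-- l[j] == v' scan is the takeWhile/dropWhile split of the remaining list), advancing the position
def get_stride_idx_altRun (gc_key : Int) : Nat → List Int → Int → List Int → List Int
  | 0, _, _, acc => acc
  | _ + 1, [], _, acc => acc
  | fuel + 1, x :: rest, pos, acc =>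
      let run := rest.takeWhile (fun y => y = x)
      let rest' := rest.dropWhile (fun y => y = x)
      get_stride_idx_altRun gc_key fuel rest' (pos + 1 + (run.length : Int))
        (if x = gc_key then acc ++ [pos] else acc)

def get_stride_idx_alt (gc_event_label : List Int) (gc_key : Int) : List Int :=
  get_stride_idx_altRun gc_key gc_event_label.length gc_event_label 0 []

-- ===== PRECONDITION & SPEC =====
-- Pre_ excludes exactly the empty list, on which A raises IndexError at gc_event_label[0]
def Pre_get_stride_idx (gc_event_label : List Int) (gc_key : Int) : Prop :=
  gc_event_label ≠ []
instance (gc_event_label : List Int) (gc_key : Int) : Decidable (Pre_get_stride_idx gc_event_label gc_key) := by unfold Pre_get_stride_idx; infer_instance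
def pvWitness_get_stride_idx : List Int × Int := ([1, 1, 0, 1], 1)

-- On an empty gc_event_label A raises IndexError (gc_event_label[0]); B returns [].
def Raises_get_stride_idx (gc_event_label : List Int) (gc_key : Int) : Prop :=
  gc_event_label = []
instance (gc_event_label : List Int) (gc_key : Int) : Decidable (Raises_get_stride_idx gc_event_label gc_key) := by unfold Raises_get_stride_idx; infer_instance
def pvRaiseWitness_get_stride_idx : List Int × Int := ([], 0)
def pvRaiseWitnessOut_get_stride_idx : List Int := []

def Spec_get_stride_idx (gc_event_label : List Int) (gc_key : Int) (out : List Int) : Prop := out = get_stride_idx_alt gc_event_label gc_key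
instance (gc_event_label : List Int) (gc_key : Int) (out : List Int) : Decidable (Spec_get_stride_idx gc_event_label gc_key out) := by unfold Spec_get_stride_idx; infer_instance

-- ===== CLAIM (what is proved, stated in full; the proofs are below) =====
def Claim_equal_get_stride_idx : Prop := ∀ (gc_event_label : List Int) (gc_key : Int), Dom_get_stride_idx gc_event_label gc_key → Pre_get_stride_idx gc_event_label gc_key → Spec_get_stride_idx gc_event_label gc_key (get_stride_idx gc_event_label gc_key)
def Claim_raises_get_stride_idx : Prop := (∀ (gc_event_label : List Int) (gc_key : Int), Dom_get_stride_idx gc_event_label gc_key → Raises_get_stride_idx gc_event_label gc_key → ¬ Pre_get_stride_idx gc_event_label gc_key) ∧ (Dom_get_stride_idx (pvRaiseWitness_get_stride_idx.1) (pvRaiseWitness_get_stride_idx.2) ∧ Raises_get_stride_idx (pvRaiseWitness_get_stride_idx.1) (pvRaiseWitness_get_stride_idx.2) ∧ get_stride_idx_alt (pvRaiseWitness_get_stride_idx.1) (pvRaiseWitness_get_stride_idx.2) = pvRaiseWitnessOut_get_stride_idx)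

-- ===== LEMMAS AND PROOFS =====

-- common specification: rising edges of l relative to a previous value `prev`, positions from `pos`
def edgeSpec (k : Int) : Int → Int → List Int → List Int
  | _, _, [] => []
  | prev, pos, x :: rest =>
      (if x = k ∧ prev ≠ k then [pos] else []) ++ edgeSpec k x (pos + 1) rest

theorem edgeSpec_cons (k prev pos x : Int) (rest : List Int) :
    edgeSpec k prev pos (x :: rest)
      = (if x = k ∧ prev ≠ k then [pos] else []) ++ edgeSpec k x (pos + 1) rest := rfl

-- appending one element on the right
theorem edgeSpec_append_singleton (k : Int) (l : List Int) (y prev pos : Int) :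
    edgeSpec k prev pos (l ++ [y])
      = edgeSpec k prev pos l
        ++ (if y = k ∧ l.getLastD prev ≠ k then [pos + (l.length : Int)] else []) := by
  induction l generalizing prev pos with
  | nil => simp [edgeSpec]
  | cons x l ih =>
      simp only [List.cons_append, edgeSpec_cons, ih x (pos + 1), List.getLastD_cons,
        List.length_cons, List.append_assoc]
      congr 2
      push_cast
      ring_nf

-- a run of copies of x contributes no edges relative to prev = x
theorem edgeSpec_run (k x pos : Int) (run rest : List Int)
    (h : ∀ z ∈ run, z = x) :
    edgeSpec k x pos (run ++ rest) = edgeSpec k x (pos + (run.length : Int)) rest := by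
  induction run generalizing pos with
  | nil => simp
  | cons z run ih =>
      have hz : z = x := h z (by simp)
      subst hz
      simp only [List.cons_append, edgeSpec_cons]
      rw [if_neg (by tauto), ih (pos + 1) (fun w hw => h w (by simp [hw]))]
      simp only [List.nil_append, List.length_cons]
      congr 1
      push_cast
      ring

-- pyGetD on a list extended on the right
theorem pyGetD_append_lt (xs : List Int) (y : Int) (i : Nat) (h : i < xs.length) :
    PySem.List.pyGetD (xs ++ [y]) (i : Int) 0 = PySem.List.pyGetD xs (i : Int) 0 := by
  rw [PySem.List.pyGetD_natCast, PySem.List.pyGetD_natCast]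
  simp [List.getD, List.getElem?_append_left h]

theorem pyGetD_append_len (xs : List Int) (y : Int) :
    PySem.List.pyGetD (xs ++ [y]) (xs.length : Int) 0 = y := by
  rw [PySem.List.pyGetD_natCast]
  simp [List.getD]

-- A computes edgeSpec (for any prev ≠ k)
theorem A_eq_edgeSpec (k : Int) (l : List Int) (hl : l ≠ []) (prev : Int) (hprev : prev ≠ k) :
    get_stride_idx l k = edgeSpec k prev 0 l := by
  induction l using List.reverseRecOn with
  | nil => exact absurd rfl hl
  | append_singleton l y ih =>
      cases l with
      | nil =>
          simp only [List.nil_append]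
          simp [get_stride_idx, edgeSpec, PySem.List.pyGetD, PySem.List.pyIdx?,
            PySem.List.pyGet?, hprev, PySem.List.pyRange_one_eq_nil]
      | cons x l0 =>
          set l' : List Int := x :: l0 with hl'
          have hne : l' ≠ [] := by simp [hl']
          have hlen : (1 : Int) ≤ (l'.length : Int) := by
            simp [hl']
          -- split the range at l'.length
          have hsplit : PySem.List.pyRange 1 ((l' ++ [y]).length : Int) 1
              = PySem.List.pyRange 1 (l'.length : Int) 1 ++ [(l'.length : Int)] := by
            have : ((l' ++ [y]).length : Int) = (l'.length : Int) + 1 := by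
              simp
            rw [this, PySem.List.pyRange_one_succ_right hlen]
          simp only [get_stride_idx, hsplit, List.foldl_append, List.foldl_cons, List.foldl_nil]
          -- the prefix fold over l' ++ [y] agrees with the fold over l'
          have hcongr :
              ∀ (init : List Int),
              (PySem.List.pyRange 1 (l'.length : Int) 1).foldl
                (fun acc i =>
                  if PySem.List.pyGetD (l' ++ [y]) i 0 = k ∧
                     ¬ PySem.List.pyGetD (l' ++ [y]) (i - 1) 0 = k
                  then acc ++ [i] else acc) init
              = (PySem.List.pyRange 1 (l'.length : Int) 1).foldl
                (fun acc i =>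
                  if PySem.List.pyGetD l' i 0 = k ∧
                     ¬ PySem.List.pyGetD l' (i - 1) 0 = k
                  then acc ++ [i] else acc) init := by
            intro init
            apply PySem.List.foldl_congr_mem
            intro acc i hi
            have hi' := (PySem.List.mem_pyRange_one).1 hi
            obtain ⟨h1, h2⟩ := hi'
            have hi0 : ∃ m : Nat, i = (m : Int) ∧ m < l'.length := by
              refine ⟨i.toNat, ?_, ?_⟩ <;> omega
            obtain ⟨m, rfl, hm⟩ := hi0
            have hm1 : ∃ m1 : Nat, (m : Int) - 1 = (m1 : Int) ∧ m1 < l'.length := by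
              refine ⟨m - 1, ?_, ?_⟩ <;> omega
            obtain ⟨m1, he, hm1lt⟩ := hm1
            rw [pyGetD_append_lt l' y m hm, he, pyGetD_append_lt l' y m1 hm1lt]
          rw [hcongr]
          -- initial element test also agrees
          have hinit : PySem.List.pyGetD (l' ++ [y]) 0 0 = PySem.List.pyGetD l' 0 0 := by
            have := pyGetD_append_lt l' y 0 (by simp [hl'])
            simpa using this
          simp only [hinit]
          have hIH := ih hne
          simp only [get_stride_idx] at hIH
          rw [hIH, edgeSpec_append_singleton]
          -- last step of the fold
          rw [pyGetD_append_len]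
          have hlast : PySem.List.pyGetD (l' ++ [y]) ((l'.length : Int) - 1) 0
              = l'.getLastD prev := by
            have hlt : l'.length - 1 < l'.length := by simp [hl']
            have he : (l'.length : Int) - 1 = ((l'.length - 1 : Nat) : Int) := by
              simp [hl']
            rw [he, pyGetD_append_lt l' y _ hlt, PySem.List.pyGetD_natCast]
            rw [List.getLastD_eq_getLast?, List.getLast?_eq_getElem?]
            simp [List.getD, List.getElem?_eq_getElem hlt]
          rw [hlast]
          by_cases hc : y = k ∧ l'.getLastD prev ≠ k
          · rw [if_pos ⟨hc.1, hc.2⟩, if_pos hc]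
            simp
          · rw [if_neg (by tauto), if_neg hc, List.append_nil]

-- B computes edgeSpec: the head of l differs from prev
theorem B_eq_edgeSpec (k : Int) (fuel : Nat) (l : List Int) (prev pos : Int) (acc : List Int)
    (hfuel : l.length ≤ fuel)
    (h : ∀ x rest, l = x :: rest → prev ≠ x) :
    get_stride_idx_altRun k fuel l pos acc = acc ++ edgeSpec k prev pos l := by
  induction fuel generalizing l prev pos acc with
  | zero =>
      have : l = [] := by
        cases l with
        | nil => rfl
        | cons a b => simp at hfuel
      subst this
      simp [get_stride_idx_altRun, edgeSpec]
  | succ fuel ih =>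
      cases l with
      | nil => simp [get_stride_idx_altRun, edgeSpec]
      | cons x rest =>
          have hprevx : prev ≠ x := h x rest rfl
          rw [get_stride_idx_altRun]
          have hsplit : rest = rest.takeWhile (fun y => y = x) ++ rest.dropWhile (fun y => y = x) :=
            (List.takeWhile_append_dropWhile).symm
          have hrun : ∀ z ∈ rest.takeWhile (fun y => y = x), z = x := by
            intro z hz
            have := List.mem_takeWhile_imp hz
            simpa using this
          have hlen : (rest.dropWhile (fun y => y = x)).length ≤ fuel := by
            have := List.length_dropWhile_le (p := fun y => decide (y = x)) rest
            simp at hfuel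
            omega
          have hhead : ∀ z rest2, rest.dropWhile (fun y => y = x) = z :: rest2 → x ≠ z := by
            intro z rest2 hz
            have hne' : rest.dropWhile (fun y => y = x) ≠ [] := by simp [hz]
            have := List.head_dropWhile_not (fun y => decide (y = x)) hne'
            have h2 : (rest.dropWhile (fun y => y = x)).head hne' = z := by simp [hz]
            rw [h2] at this
            simp at this
            exact fun hxz => this hxz.symm
          have hE : edgeSpec k x (pos + 1) rest
              = edgeSpec k x (pos + 1 + ((rest.takeWhile (fun y => y = x)).length : Int))
                  (rest.dropWhile (fun y => y = x)) := by
            conv_lhs => rw [hsplit]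
            exact edgeSpec_run k x (pos + 1) _ _ hrun
          rw [ih _ x _ _ hlen hhead]
          rw [edgeSpec_cons, hE]
          have hcond : (x = k ∧ prev ≠ k) ↔ x = k := by
            constructor
            · exact fun hc => hc.1
            · intro hx; exact ⟨hx, by rw [hx] at hprevx; exact hprevx⟩
          by_cases hx : x = k
          · rw [if_pos (hcond.2 hx), if_pos hx]
            simp
          · rw [if_neg (fun hc => hx (hcond.1 hc)), if_neg hx]
            simp

-- ===== VERDICT (by name: the statement is the Claim_ definition above) =====
theorem get_stride_idx_spec : Claim_equal_get_stride_idx := by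
  intro l k _ hpre
  unfold Spec_get_stride_idx get_stride_idx_alt
  cases l with
  | nil => exact absurd rfl hpre
  | cons x rest =>
      have hprev : max k x + 1 ≠ k := by omega
      have hprevx : max k x + 1 ≠ x := by omega
      rw [A_eq_edgeSpec k (x :: rest) (by simp) (max k x + 1) hprev,
        B_eq_edgeSpec k (x :: rest).length (x :: rest) (max k x + 1) 0 [] le_rfl
          (by intro x' rest' he; cases he; exact hprevx)]
      simp

def get_stride_idx_raises : Claim_raises_get_stride_idx := by
  unfold Claim_raises_get_stride_idx
  exact ⟨fun l k _ hr hp => hp hr, by decide⟩
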